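-- pv_equiv track=rewrite | github.com/saurabhndis/identity-fuzzer | lib/ad-simulator/src/ad_simulator/directory/filters.py | _find_closing_paren_content
-- ===== SOURCE A (Python) =====
-- class FilterParseError(Exception):
--     """Raised when an LDAP filter string cannot be parsed."""
--
-- def _find_closing_paren_content(s: str, pos: int) -> int:
--     """Find the end position of simple filter content (before the closing ')')."""
--     i = pos
--     while i < len(s):
--         if s[i] == ")":
--             return i
--         if s[i] == "\\" and i + 1 < len(s):
--             i += 2  # skip escaped char
--         else:
--             i += 1
--     raise FilterParseError(f"Unterminated filter starting at position {pos}")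
-- ===== SOURCE B (Python) =====
-- class FilterParseError(Exception):
--     """Raised when an LDAP filter string cannot be parsed."""
--
-- def _find_closing_paren_content(s: str, pos: int) -> int:
--     """Find the end position of simple filter content (before the closing ')').
--
--     Jumps between ')' candidates with str.find and accepts the first one
--     preceded by an even-length run of backslashes (an escaped ')' sits after
--     an odd run), instead of stepping character by character.
--     """
--     j = s.find(")", pos)
--     while j != -1:
--         k = j
--         while k > pos and s[k - 1] == "\\":
--             k -= 1
--         if (j - k) % 2 == 0:
--             return j
--         j = s.find(")", j + 1)
--     raise FilterParseError(f"Unterminated filter starting at position {pos}")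
-- ===== Notes on version B (the rewrite author's own statement) =====
-- stated objective: alternative
-- what changed: Replaces A's character-by-character scan with escape-pair stepping by str.find jumps to each ')' candidate plus a backslash-run parity check (an escaped ')' sits after an odd run of backslashes).
-- outside the precondition, e.g. on _find_closing_paren_content('ab)', -2): A returns -1, B returns 2; on _find_closing_paren_content(')ab', -1): A returns 0, B raises FilterParseError
import Mathlib
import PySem

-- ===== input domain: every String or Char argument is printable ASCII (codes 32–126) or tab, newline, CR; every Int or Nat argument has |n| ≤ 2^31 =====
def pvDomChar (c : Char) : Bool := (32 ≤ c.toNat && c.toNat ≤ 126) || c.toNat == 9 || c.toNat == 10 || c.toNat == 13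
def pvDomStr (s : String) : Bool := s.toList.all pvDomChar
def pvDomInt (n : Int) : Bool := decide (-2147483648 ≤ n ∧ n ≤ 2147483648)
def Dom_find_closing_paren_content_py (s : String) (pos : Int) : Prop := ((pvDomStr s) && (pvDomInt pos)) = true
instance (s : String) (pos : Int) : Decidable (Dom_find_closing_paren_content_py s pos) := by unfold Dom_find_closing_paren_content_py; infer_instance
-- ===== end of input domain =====

-- B replaces A's char-by-char scan (stepping over escape pairs) with str.find jumps to ')' candidates
-- plus a backslash-run parity test; same cost, genuinely different traversal.


-- ===== PORT A =====
-- A's while-loop: i steps by 1, or by 2 over '\'+char; returns i at the first ')' reached.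
-- Fuel bounds the loop (sufficient for every pos); -1 stands for the FilterParseError raise (outside Pre_).
def pvALoop (l : List Char) (i : Int) : Nat → Int
  | 0 => -1
  | fuel + 1 =>
    if i < (l.length : Int) then
      match PySem.List.pyGet? l i with
      | some c =>
        if c = ')' then i
        else if c = '\\' ∧ i + 1 < (l.length : Int) then pvALoop l (i + 2) fuel
        else pvALoop l (i + 1) fuel
      | none => -1   -- Python IndexError (only reachable for pos < -len; outside Pre_)
    else -1          -- raise FilterParseError (outside Pre_)

def find_closing_paren_content_py (s : String) (pos : Int) : Int :=
  pvALoop s.toList pos (s.toList.length + 1 + (-pos).toNat)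

-- ===== PORT B =====
-- s.find(")", start) for a Nat start: first index ≥ start holding ')', else -1.
def pvFindClose (l : List Char) (start : Nat) : Int :=
  if h : start < l.length then
    if l[start] = ')' then (start : Int) else pvFindClose l (start + 1)
  else -1
termination_by l.length - start

-- inner while loop: k -= 1 while k > pos and s[k-1] == '\\'  (pyGet? = Python's s[k-1], also for
-- negative k; fuel bounds the descent, sufficient for every pos; none = IndexError, loop port stops)
def pvBackK (l : List Char) (pos k : Int) : Nat → Int
  | 0 => k
  | f + 1 =>
    if pos < k ∧ PySem.List.pyGet? l (k - 1) = some '\\' then pvBackK l pos (k - 1) f else k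

-- outer while loop over the successive find results
def pvBLoop (l : List Char) (pos : Int) (start : Nat) : Nat → Int
  | 0 => -1
  | fuel + 1 =>
    let j := pvFindClose l start
    if j = -1 then -1   -- raise FilterParseError (outside Pre_)
    else
      let k := pvBackK l pos j (j.toNat + 1 + (-pos).toNat)
      if PySem.Int.mod (j - k) 2 = 0 then j else pvBLoop l pos (j.toNat + 1) fuel

def find_closing_paren_content_py_alt (s : String) (pos : Int) : Int :=
  -- j = s.find(")", pos): Python clamps a negative start to len+pos (and then to 0)
  pvBLoop s.toList pos (if pos < 0 then (s.toList.length + pos).toNat else pos.toNat) (s.toList.length + 1)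

-- ===== PRECONDITION & SPEC =====
-- length of the backslash run inside [p, j) ending just before position j
def pvBsRun (l : List Char) (p : Nat) : Nat → Nat
  | 0 => 0
  | j + 1 => if p ≤ j ∧ l[j]? = some '\\' then pvBsRun l p j + 1 else 0

-- Pre_ excludes (a) inputs where A raises FilterParseError (no reachable unescaped ')' at or after
-- pos), and (b) negative pos, where A reads the TAIL of the string first through Python's
-- negative-index wraparound — an accident of the indexing; B raises or returns other positions there.
def Pre_find_closing_paren_content_py (s : String) (pos : Int) : Prop :=
  0 ≤ pos ∧ ∃ j ∈ List.range s.toList.length,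
    pos.toNat ≤ j ∧ s.toList[j]? = some ')' ∧ pvBsRun s.toList pos.toNat j % 2 = 0
instance (s : String) (pos : Int) : Decidable (Pre_find_closing_paren_content_py s pos) := by
  unfold Pre_find_closing_paren_content_py; infer_instance

def pvWitness_find_closing_paren_content_py : String × Int := ("(a=b\\))", 1)

def Spec_find_closing_paren_content_py (s : String) (pos : Int) (out : Int) : Prop := out = find_closing_paren_content_py_alt s pos
instance (s : String) (pos : Int) (out : Int) : Decidable (Spec_find_closing_paren_content_py s pos out) := by unfold Spec_find_closing_paren_content_py; infer_instance

-- ===== CLAIM (what is proved, stated in full; the proofs are below) =====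
def Claim_equal_find_closing_paren_content_py : Prop := ∀ (s : String) (pos : Int), Dom_find_closing_paren_content_py s pos → Pre_find_closing_paren_content_py s pos → Spec_find_closing_paren_content_py s pos (find_closing_paren_content_py s pos)

-- ===== LEMMAS AND PROOFS =====

-- common reference: first j ≥ i with l[j] = ')' and an even backslash run (measured from p)
def pvG (l : List Char) (p i : Nat) : Int :=
  if h : i < l.length then
    if l[i] = ')' ∧ pvBsRun l p i % 2 = 0 then (i : Int) else pvG l p (i + 1)
  else -1
termination_by l.length - i

theorem pvBsRun_le (l : List Char) (p : Nat) (j : Nat) : pvBsRun l p j ≤ j - p := by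
  induction j with
  | zero => simp [pvBsRun]
  | succ m ih =>
    rw [pvBsRun]
    split_ifs with h
    · omega
    · omega

theorem pvBsRun_self (l : List Char) (p : Nat) : pvBsRun l p p = 0 := by
  have := pvBsRun_le l p p
  omega

theorem pvBsRun_shift_one (l : List Char) (p : Nat) (hp : ¬ l[p]? = some '\\') :
    ∀ j, p + 1 ≤ j → pvBsRun l p j = pvBsRun l (p + 1) j := by
  intro j
  induction j with
  | zero => omega
  | succ m ih =>
    intro hm
    by_cases hme : p + 1 ≤ m
    · simp only [pvBsRun, ih hme]
      have hiff : (p ≤ m ∧ l[m]? = some '\\') ↔ (p + 1 ≤ m ∧ l[m]? = some '\\') := by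
        constructor <;> rintro ⟨h1, h2⟩ <;> exact ⟨by omega, h2⟩
      rw [if_congr hiff rfl rfl]
    · have hmp : m = p := by omega
      subst hmp
      simp [pvBsRun, hp]

theorem pvBsRun_shift_two (l : List Char) (p : Nat) (hp : l[p]? = some '\\') :
    ∀ j, p + 2 ≤ j → pvBsRun l p j % 2 = pvBsRun l (p + 2) j % 2 := by
  intro j
  induction j with
  | zero => omega
  | succ m ih =>
    intro hm
    by_cases hme : p + 2 ≤ m
    · by_cases hbs : l[m]? = some '\\'
      · have h1 : p ≤ m := by omega
        simp only [pvBsRun, h1, hme, hbs, and_true, if_true]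
        omega
      · simp [pvBsRun, hbs]
    · have hmp : m = p + 1 := by omega
      subst hmp
      by_cases hbs : l[p + 1]? = some '\\'
      · simp [pvBsRun, hbs, hp, pvBsRun_self]
      · simp [pvBsRun, hbs]

theorem pvG_congr (l : List Char) (p p' i : Nat)
    (h : ∀ j, i ≤ j → pvBsRun l p j % 2 = pvBsRun l p' j % 2) :
    pvG l p i = pvG l p' i := by
  by_cases hi : i < l.length
  · conv_lhs => rw [pvG]
    conv_rhs => rw [pvG]
    rw [dif_pos hi, dif_pos hi, h i le_rfl]
    by_cases hc : l[i] = ')' ∧ pvBsRun l p' i % 2 = 0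
    · rw [if_pos hc, if_pos hc]
    · rw [if_neg hc, if_neg hc]
      exact pvG_congr l p p' (i + 1) (fun j hj => h j (by omega))
  · conv_lhs => rw [pvG]
    conv_rhs => rw [pvG]
    rw [dif_neg hi, dif_neg hi]
termination_by l.length - i

theorem pvG_none (l : List Char) (p i : Nat)
    (hno : ∀ m, i ≤ m → ∀ (hm : m < l.length), l[m] ≠ ')') : pvG l p i = -1 := by
  by_cases hi : i < l.length
  · rw [pvG, dif_pos hi, if_neg (by intro hcc; exact hno i le_rfl hi hcc.1)]
    exact pvG_none l p (i + 1) (fun m h1 h2 => hno m (by omega) h2)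
  · rw [pvG, dif_neg hi]
termination_by l.length - i

-- A's scan started at i computes pvG l i i
theorem pvALoop_eq_pvG (l : List Char) (i : Nat) (fuel : Nat) (hf : l.length ≤ i + fuel) :
    pvALoop l (i : Int) fuel = pvG l i i := by
  induction fuel generalizing i with
  | zero =>
    have hni : ¬ i < l.length := by omega
    simp [pvALoop, pvG, hni]
  | succ f ih =>
    by_cases hi : i < l.length
    · rw [pvALoop, if_pos (by exact_mod_cast hi)]
      rw [PySem.List.pyGet?_natCast, List.getElem?_eq_getElem hi]
      simp only
      by_cases hc : l[i] = ')'
      · rw [if_pos hc, pvG, dif_pos hi, if_pos ⟨hc, by rw [pvBsRun_self]⟩]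
      · rw [if_neg hc]
        by_cases hb : l[i] = '\\' ∧ (i : Int) + 1 < (l.length : Int)
        · -- escape pair: skip two characters
          rw [if_pos hb]
          have hi2 : ((i : Int) + 2) = ((i + 2 : Nat) : Int) := by push_cast; ring
          rw [hi2, ih (i + 2) (by omega)]
          have hbs : l[i]? = some '\\' := by rw [List.getElem?_eq_getElem hi, hb.1]
          have hi1 : i + 1 < l.length := by
            have := hb.2; omega
          have hstep2 : pvG l i i = pvG l i (i + 2) := by
            rw [pvG, dif_pos hi, if_neg (by intro hcc; exact hc hcc.1)]
            rw [pvG, dif_pos hi1]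
            have hrun1 : pvBsRun l i (i + 1) = 1 := by
              simp [pvBsRun, hbs, pvBsRun_self]
            rw [if_neg (by intro hcc; rw [hrun1] at hcc; omega)]
          rw [hstep2]
          exact (pvG_congr l i (i + 2) (i + 2) (fun j hj => pvBsRun_shift_two l i hbs j hj)).symm
        · -- single step
          rw [if_neg hb]
          have hi1 : ((i : Int) + 1) = ((i + 1 : Nat) : Int) := by push_cast; ring
          rw [hi1, ih (i + 1) (by omega)]
          have hstep : pvG l i i = pvG l i (i + 1) := by
            rw [pvG, dif_pos hi, if_neg (by intro hcc; exact hc hcc.1)]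
          rw [hstep]
          by_cases hbs : l[i]? = some '\\'
          · -- a '\' at the last position: both sides are -1
            have hlen : l.length = i + 1 := by
              rcases not_and_or.mp hb with h1 | h2
              · exact absurd (by rw [List.getElem?_eq_getElem hi] at hbs; exact Option.some.inj hbs) h1
              · have h2' : ¬ ((i : Int) + 1 < (l.length : Int)) := h2
                omega
            rw [pvG_none l (i + 1) (i + 1) (fun m h1 h2 => by omega),
                pvG_none l i (i + 1) (fun m h1 h2 => by omega)]
          · exact (pvG_congr l i (i + 1) (i + 1)
              (fun j hj => by rw [pvBsRun_shift_one l i hbs j hj])).symm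
    · have hile : (l.length : Int) ≤ (i : Int) := by exact_mod_cast not_lt.mp hi
      simp [pvALoop, pvG, hi, not_lt.mpr hile]

theorem pvFindClose_nonneg (l : List Char) (start : Nat) :
    pvFindClose l start = -1 ∨ ∃ jn : Nat, pvFindClose l start = (jn : Int) := by
  by_cases hs : start < l.length
  · rw [pvFindClose, dif_pos hs]
    by_cases hc : l[start] = ')'
    · exact Or.inr ⟨start, by rw [if_pos hc]⟩
    · rw [if_neg hc]; exact pvFindClose_nonneg l (start + 1)
  · rw [pvFindClose, dif_neg hs]; exact Or.inl rfl
termination_by l.length - start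

theorem pvFindClose_neg (l : List Char) (start : Nat) (h : pvFindClose l start = -1) :
    ∀ j, start ≤ j → ∀ (hjl : j < l.length), l[j] ≠ ')' := by
  intro j hj hjl
  by_cases hs : start < l.length
  · rw [pvFindClose, dif_pos hs] at h
    by_cases hc : l[start] = ')'
    · rw [if_pos hc] at h; omega
    · rw [if_neg hc] at h
      rcases Nat.eq_or_lt_of_le hj with rfl | hlt
      · exact hc
      · exact pvFindClose_neg l (start + 1) h j hlt hjl
  · omega
termination_by l.length - start

theorem pvFindClose_pos (l : List Char) (start : Nat) (j : Nat)
    (h : pvFindClose l start = (j : Int)) :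
    start ≤ j ∧ j < l.length ∧ l[j]? = some ')' ∧ ∀ m, start ≤ m → m < j → l[m]? ≠ some ')' := by
  by_cases hs : start < l.length
  · rw [pvFindClose, dif_pos hs] at h
    by_cases hc : l[start] = ')'
    · rw [if_pos hc] at h
      have hj : j = start := by omega
      subst hj
      exact ⟨le_rfl, hs, by rw [List.getElem?_eq_getElem hs, hc], fun m h1 h2 => by omega⟩
    · rw [if_neg hc] at h
      obtain ⟨h1, h2, h3, h4⟩ := pvFindClose_pos l (start + 1) j h
      refine ⟨by omega, h2, h3, fun m hm1 hm2 => ?_⟩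
      rcases Nat.eq_or_lt_of_le hm1 with rfl | hlt
      · rw [List.getElem?_eq_getElem hs]
        intro hx; exact hc (Option.some.inj hx)
      · exact h4 m hlt hm2
  · rw [pvFindClose, dif_neg hs] at h; omega
termination_by l.length - start

theorem pvG_skip_no_close (l : List Char) (p i j : Nat) (hij : i ≤ j)
    (hno : ∀ m, i ≤ m → m < j → m < l.length → l[m]? ≠ some ')') :
    pvG l p i = pvG l p j := by
  rcases Nat.eq_or_lt_of_le hij with rfl | hlt
  · rfl
  · by_cases hi : i < l.length
    · rw [pvG, dif_pos hi, if_neg (by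
        intro hcc
        exact hno i le_rfl hlt hi (by rw [List.getElem?_eq_getElem hi, hcc.1]))]
      exact pvG_skip_no_close l p (i + 1) j hlt (fun m h1 h2 h3 => hno m (by omega) h2 h3)
    · rw [pvG, dif_neg hi, pvG, dif_neg (by omega)]
termination_by l.length - i

theorem pvBackK_eq (l : List Char) (p k fuel : Nat) (hf : k ≤ fuel) :
    pvBackK l (p : Int) (k : Int) fuel = ((k - pvBsRun l p k : Nat) : Int) := by
  induction k generalizing fuel with
  | zero =>
    cases fuel with
    | zero => simp [pvBackK, pvBsRun]
    | succ f =>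
      rw [pvBackK, if_neg (by intro hcc; have := hcc.1; omega)]
      simp [pvBsRun]
  | succ m ih =>
    cases fuel with
    | zero => omega
    | succ f =>
      have hidx : ((m + 1 : Nat) : Int) - 1 = ((m : Nat) : Int) := by push_cast; ring
      by_cases hc : p ≤ m ∧ l[m]? = some '\\'
      · rw [pvBackK, if_pos ⟨by exact_mod_cast Nat.lt_succ_of_le hc.1, by
          rw [hidx, PySem.List.pyGet?_natCast, hc.2]⟩]
        rw [hidx, ih f (by omega)]
        have hrun : pvBsRun l p (m + 1) = pvBsRun l p m + 1 := by
          rw [pvBsRun, if_pos hc]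
        rw [hrun]
        have heq : m + 1 - (pvBsRun l p m + 1) = m - pvBsRun l p m := by omega
        rw [heq]
      · rw [pvBackK, if_neg (by
          intro hcc
          rw [hidx, PySem.List.pyGet?_natCast] at hcc
          exact hc ⟨by exact_mod_cast Nat.lt_succ_iff.mp (by exact_mod_cast hcc.1), hcc.2⟩)]
        have hrun : pvBsRun l p (m + 1) = 0 := by
          rw [pvBsRun, if_neg hc]
        rw [hrun]
        omega

-- B's outer loop computes pvG l p start
theorem pvBLoop_eq_pvG (l : List Char) (p start fuel : Nat)
    (hf : l.length ≤ start + fuel) :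
    pvBLoop l (p : Int) start fuel = pvG l p start := by
  induction fuel generalizing start with
  | zero =>
    rw [pvBLoop, pvG_none l p start (fun m h1 h2 => by omega)]
  | succ f ih =>
    rw [pvBLoop]
    rcases pvFindClose_nonneg l start with hfind | ⟨jn, hfind⟩
    · rw [pvG_none l p start (fun m h1 h2 => pvFindClose_neg l start hfind m h1 h2)]
      simp [hfind]
    · obtain ⟨hsj, hjl, hjc, hno⟩ := pvFindClose_pos l start jn hfind
      simp only [hfind]
      rw [if_neg (by omega)]
      have htn : ((jn : Int)).toNat = jn := Int.toNat_natCast jn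
      have hneg : (-(p : Int)).toNat = 0 := by omega
      rw [htn, hneg, pvBackK_eq l p jn (jn + 1 + 0) (by omega)]
      have hrle : pvBsRun l p jn ≤ jn := by have := pvBsRun_le l p jn; omega
      have hsub : (jn : Int) - ((jn - pvBsRun l p jn : Nat) : Int) = ((pvBsRun l p jn : Nat) : Int) := by
        push_cast [hrle]; ring
      rw [hsub]
      have hmod : PySem.Int.mod ((pvBsRun l p jn : Nat) : Int) 2 = ((pvBsRun l p jn % 2 : Nat) : Int) := by
        exact_mod_cast PySem.Int.mod_natCast (pvBsRun l p jn) 2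
      rw [hmod]
      have hskip : pvG l p start = pvG l p jn :=
        pvG_skip_no_close l p start jn hsj (fun m h1 h2 _ => hno m h1 h2)
      rw [hskip, pvG, dif_pos hjl]
      have hjc' : l[jn] = ')' := by
        rw [List.getElem?_eq_getElem hjl] at hjc; exact Option.some.inj hjc
      by_cases hpar : pvBsRun l p jn % 2 = 0
      · rw [if_pos (show ((pvBsRun l p jn % 2 : Nat) : Int) = 0 by exact_mod_cast hpar),
            if_pos ⟨hjc', hpar⟩]
      · rw [if_neg (show ¬ ((pvBsRun l p jn % 2 : Nat) : Int) = 0 by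
              intro hcc; exact hpar (by exact_mod_cast hcc)),
            if_neg (fun hcc => hpar hcc.2), ih (jn + 1) (by omega)]

-- ===== VERDICT (by name: the statement is the Claim_ definition above) =====
theorem find_closing_paren_content_py_spec : Claim_equal_find_closing_paren_content_py := by
  intro s pos _ hpre
  obtain ⟨hpos, _⟩ := hpre
  unfold Spec_find_closing_paren_content_py
  unfold find_closing_paren_content_py find_closing_paren_content_py_alt
  have hcast : pos = ((pos.toNat : Nat) : Int) := (Int.toNat_of_nonneg hpos).symm
  have hneg : (-pos).toNat = 0 := by omega
  rw [hneg, if_neg (by omega : ¬ pos < 0)]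
  rw [hcast]
  rw [Int.toNat_natCast]
  rw [pvALoop_eq_pvG s.toList pos.toNat (s.toList.length + 1 + 0) (by omega)]
  rw [pvBLoop_eq_pvG s.toList pos.toNat pos.toNat (s.toList.length + 1) (by omega)]
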